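-- pv_equiv track=rewrite | github.com/yosefgoren/amdahl-gen | sample/parse_perfanno.py | parse_section_delims
-- ===== SOURCE A (Python) =====
-- def parse_section_delims(text: str) -> list:
--     lines = text.splitlines()
--     delim_indices = [idx for idx, line in enumerate(lines) if line.startswith('----------------------')]
--     delim_indices.append(len(lines)+1)
--     sections = []
--     for meta_idx, start_delim_idx in enumerate(delim_indices[:-1]):
--         end_delim_idx = delim_indices[meta_idx+1]
--         if start_delim_idx < 1:
--             raise Exception('perf annotation in bad format. section delimiter "-----..." as first line')
--         title = lines[start_delim_idx-1]
--         header = lines[start_delim_idx+1:start_delim_idx+7]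
--         content = lines[start_delim_idx+7:end_delim_idx-1]
--         sections.append((title, header, content))
--     return sections
-- ===== SOURCE B (Python) =====
-- def parse_section_delims(text: str) -> list:
--     lines = text.splitlines()
--     sections = []
--     pending = None
--     for idx, line in enumerate(lines):
--         if line.startswith('----------------------'):
--             if pending is not None:
--                 if pending < 1:
--                     raise Exception('perf annotation in bad format. section delimiter "-----..." as first line')
--                 sections.append((lines[pending-1], lines[pending+1:pending+7], lines[pending+7:idx-1]))
--             pending = idx
--     if pending is not None:
--         if pending < 1:
--             raise Exception('perf annotation in bad format. section delimiter "-----..." as first line')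
--         sections.append((lines[pending-1], lines[pending+1:pending+7], lines[pending+7:]))
--     return sections
-- ===== Notes on version B (the rewrite author's own statement) =====
-- stated objective: simpler
-- what changed: B replaces A's two-phase scheme (precompute the list of delimiter line indices, append a sentinel, then walk consecutive index pairs) by a single pass over the enumerated lines that carries a 'pending start delimiter index' and flushes the last section after the loop, so no delimiter-index list or sentinel exists.
import Mathlib
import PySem

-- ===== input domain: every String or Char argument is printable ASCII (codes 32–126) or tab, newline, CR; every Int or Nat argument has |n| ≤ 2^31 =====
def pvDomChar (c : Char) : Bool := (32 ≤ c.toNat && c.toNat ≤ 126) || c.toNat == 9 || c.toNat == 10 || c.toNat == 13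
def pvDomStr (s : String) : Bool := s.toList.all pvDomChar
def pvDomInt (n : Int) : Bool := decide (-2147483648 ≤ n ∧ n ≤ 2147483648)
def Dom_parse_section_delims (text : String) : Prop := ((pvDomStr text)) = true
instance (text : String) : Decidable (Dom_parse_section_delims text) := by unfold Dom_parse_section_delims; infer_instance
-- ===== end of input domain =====

-- B replaces A's precomputed delimiter-index list (+ sentinel + paired walk) by a single pass over
-- the enumerated lines with a 'pending start delimiter' accumulator (objective: simpler decomposition).

-- ===== PORT A =====
-- walk consecutive pairs of delim_indices (= the 'for meta_idx, start_delim_idx' loop of A);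
-- 'none' is exactly where the Python raises (start_delim_idx < 1) or indexing fails.
def pvGoA (lines : List String) :
    List Int → List (String × List String × List String) →
    Option (List (String × List String × List String))
  | s :: e :: rest, acc =>
      if s < 1 then none
      else
        match PySem.List.pyGet? lines (s - 1) with
        | none => none
        | some title =>
            pvGoA lines (e :: rest)
              (acc ++ [(title,
                PySem.List.slice lines (some (s + 1)) (some (s + 7)),
                PySem.List.slice lines (some (s + 7)) (some (e - 1)))])
  | _, acc => some acc

def parse_section_delims (text : String) : List (String × List String × List String) :=
  let lines := PySem.Str.splitlines text
  let delim_indices :=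
    ((PySem.List.enumerate lines 0).filter
      (fun p => PySem.Str.startswith p.2 "----------------------")).map (fun p => p.1)
  (pvGoA lines (delim_indices ++ [(lines.length : Int) + 1]) []).getD []

-- ===== PORT B =====
-- single pass over the lines with index idx and a pending start-delimiter index; final flush at [].
def pvGoB (lines : List String) :
    List String → Int → Option Int → List (String × List String × List String) →
    Option (List (String × List String × List String))
  | [], _, pending, acc =>
      match pending with
      | none => some acc
      | some p =>
          if p < 1 then none
          else
            match PySem.List.pyGet? lines (p - 1) with
            | none => none
            | some title =>
                some (acc ++ [(title,
                  PySem.List.slice lines (some (p + 1)) (some (p + 7)),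
                  PySem.List.slice lines (some (p + 7)) none)])
  | l :: rest, idx, pending, acc =>
      if PySem.Str.startswith l "----------------------" then
        match pending with
        | none => pvGoB lines rest (idx + 1) (some idx) acc
        | some p =>
            if p < 1 then none
            else
              match PySem.List.pyGet? lines (p - 1) with
              | none => none
              | some title =>
                  pvGoB lines rest (idx + 1) (some idx)
                    (acc ++ [(title,
                      PySem.List.slice lines (some (p + 1)) (some (p + 7)),
                      PySem.List.slice lines (some (p + 7)) (some (idx - 1)))])
      else pvGoB lines rest (idx + 1) pending acc

def parse_section_delims_alt (text : String) : List (String × List String × List String) :=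
  let lines := PySem.Str.splitlines text
  (pvGoB lines lines 0 none []).getD []

-- ===== PRECONDITION & SPEC =====
-- Pre_ excludes exactly the inputs where Python A raises its Exception: a first line that is a
-- section delimiter (then B raises the same Exception; both ports return none there).
def Pre_parse_section_delims (text : String) : Prop :=
  ∀ l ∈ (PySem.Str.splitlines text).take 1,
    PySem.Str.startswith l "----------------------" = false
instance (text : String) : Decidable (Pre_parse_section_delims text) := by
  unfold Pre_parse_section_delims; infer_instance

def pvWitness_parse_section_delims : String :=
  "title\n----------------------\nh1\nh2\nh3\nh4\nh5\nh6\ncontent line"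

def Spec_parse_section_delims (text : String) (out : List (String × List String × List String)) : Prop := out = parse_section_delims_alt text
instance (text : String) (out : List (String × List String × List String)) : Decidable (Spec_parse_section_delims text out) := by unfold Spec_parse_section_delims; infer_instance

-- ===== CLAIM (what is proved, stated in full; the proofs are below) =====
def Claim_equal_parse_section_delims : Prop := ∀ (text : String), Dom_parse_section_delims text → Pre_parse_section_delims text → Spec_parse_section_delims text (parse_section_delims text)

-- ===== LEMMAS AND PROOFS =====

-- A's delimiter-index list, in the recursive form the induction needs.
def pvDelims (i : Int) : List String → List Int
  | [] => []
  | l :: rest =>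
      if PySem.Str.startswith l "----------------------" then i :: pvDelims (i + 1) rest
      else pvDelims (i + 1) rest

lemma pvDelims_eq (ls : List String) (i : Int) :
    ((PySem.List.enumerate ls i).filter
      (fun p => PySem.Str.startswith p.2 "----------------------")).map (fun p => p.1)
      = pvDelims i ls := by
  induction ls generalizing i with
  | nil => simp [PySem.List.enumerate_nil, pvDelims]
  | cons l rest ih =>
      rw [PySem.List.enumerate_cons, List.filter_cons]
      cases h : PySem.Str.startswith l "----------------------" <;>
        simp only [h, Bool.false_eq_true, if_false, if_true, List.map_cons, ih, pvDelims]

lemma pvSlice_to_len {α : Type} (xs : List α) (a : Int) (ha : 0 ≤ a) :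
    PySem.List.slice xs (some a) (some (xs.length : Int)) = PySem.List.slice xs (some a) none := by
  rw [PySem.List.slice_toNat xs ha (by positivity), PySem.List.slice_from xs ha]
  simp only [Int.toNat_natCast]
  exact List.take_of_length_le (by simp)

lemma pvMain (lines : List String) (rest : List String) (i : Int) (pending : Option Int)
    (acc : List (String × List String × List String))
    (hp : ∀ p, pending = some p → 0 ≤ p) (hi : 0 ≤ i) :
    pvGoB lines rest i pending acc
      = pvGoA lines (pending.toList ++ pvDelims i rest ++ [(lines.length : Int) + 1]) acc := by
  induction rest generalizing i pending acc with
  | nil =>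
      match pending with
      | none => simp [pvGoB, pvDelims, pvGoA]
      | some p =>
          have hp0 : 0 ≤ p := hp p rfl
          simp only [pvGoB, pvDelims, Option.toList, List.nil_append, List.cons_append, pvGoA]
          split_ifs with h
          · rfl
          · cases hg : PySem.List.pyGet? lines (p - 1) with
            | none => rfl
            | some title =>
                have he : (lines.length : Int) + 1 - 1 = (lines.length : Int) := by ring
                rw [he, pvSlice_to_len lines (p + 7) (by omega)]
  | cons l rest ih =>
      by_cases hd : PySem.Str.startswith l "----------------------" = true
      · match pending with
        | none =>
            simp only [pvGoB, pvDelims, hd, if_true, Option.toList, List.nil_append,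
              List.cons_append]
            rw [ih (i + 1) (some i) acc (by intro q hq; cases hq; omega) (by omega)]
            rfl
        | some p =>
            have hp0 : 0 ≤ p := hp p rfl
            simp only [pvGoB, pvDelims, hd, if_true, Option.toList, List.nil_append,
              List.cons_append, pvGoA]
            split_ifs with h
            · rfl
            · cases hg : PySem.List.pyGet? lines (p - 1) with
              | none => rfl
              | some title =>
                  simp only [hg]
                  rw [ih (i + 1) (some i) _ (by intro q hq; cases hq; omega) (by omega)]
                  rfl
      · simp only [pvGoB, pvDelims, hd, Bool.false_eq_true, if_false]
        rw [ih (i + 1) pending acc hp (by omega)]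

-- ===== VERDICT (by name: the statement is the Claim_ definition above) =====
theorem parse_section_delims_spec : Claim_equal_parse_section_delims := by
  intro text _ _
  unfold Spec_parse_section_delims
  simp only [parse_section_delims, parse_section_delims_alt]
  rw [pvDelims_eq, pvMain (PySem.Str.splitlines text) (PySem.Str.splitlines text) 0 none []
    (by rintro p h; cases h) (by omega)]
  simp
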